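-- pv_equiv track=rewrite | github.com/nkgeorgiev/HackBulgaria---Programming101---2 | week0/HarderProblemSet/isanbn.py | is_an_bn
-- ===== SOURCE A (Python) =====
-- def is_an_bn(word):
--     if word == '':
--         return True
--     a = 0
--     if word[0] != 'a':
--         return False
--     for char in word:
--         if char == 'a':
--             a += 1
--         elif char == 'b':
--             break
--         else:
--             return False
--     for i in range(a, len(word)):
--         if word[i] != 'b':
--             return False
--         a -= 1
--     return a == 0
-- ===== SOURCE B (Python) =====
-- def is_an_bn(word):
--     n = len(word) // 2
--     return len(word) % 2 == 0 and word == 'a' * n + 'b' * n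
-- ===== Notes on version B (the rewrite author's own statement) =====
-- stated objective: simpler
-- what changed: Replaces A's count-leading-a's-then-validate-trailing-b's two-loop scan with a closed-form construction: build the canonical a^n b^n string for n = len//2 and compare it to the input once.
import Mathlib
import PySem

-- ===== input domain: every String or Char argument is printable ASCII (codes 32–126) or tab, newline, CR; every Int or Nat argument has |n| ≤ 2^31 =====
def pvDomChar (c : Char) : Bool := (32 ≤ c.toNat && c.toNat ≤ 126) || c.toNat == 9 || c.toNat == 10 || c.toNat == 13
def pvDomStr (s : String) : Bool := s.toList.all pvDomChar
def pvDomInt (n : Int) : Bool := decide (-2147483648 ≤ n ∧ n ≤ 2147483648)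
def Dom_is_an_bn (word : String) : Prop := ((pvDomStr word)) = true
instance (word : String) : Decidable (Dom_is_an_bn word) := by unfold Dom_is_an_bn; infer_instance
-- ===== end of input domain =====

-- B replaces A's count-then-validate two-loop scan by building the canonical a^n b^n
-- string (n = len//2) and comparing once; proved to return the same Bool on all inputs.


-- ===== PORT A =====
-- first loop of A: count leading 'a's into `a`, break on 'b', any other char → early False (none)
def pvLoop1 : List Char → Int → Option Int
  | [], a => some a
  | c :: rest, a =>
    if c == 'a' then pvLoop1 rest (a + 1)
    else if c == 'b' then some a
    else none

-- second loop of A: for each remaining position (chars from index a on), require 'b' and a -= 1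
def pvLoop2 : List Char → Int → Bool
  | [], a => a == 0
  | c :: rest, a => if c != 'b' then false else pvLoop2 rest (a - 1)

def is_an_bn (word : String) : Bool :=
  let cs := word.toList
  if cs == [] then true
  else if cs.head? != some 'a' then false
  else
    match pvLoop1 cs 0 with
    | none => false
    | some a => pvLoop2 (cs.drop a.toNat) a

-- ===== PORT B =====
def is_an_bn_alt (word : String) : Bool :=
  let cs := word.toList
  let n := cs.length / 2
  (cs.length % 2 == 0) && (cs == List.replicate n 'a' ++ List.replicate n 'b')

-- ===== PRECONDITION & SPEC =====
def Spec_is_an_bn (word : String) (out : Bool) : Prop := out = is_an_bn_alt word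
instance (word : String) (out : Bool) : Decidable (Spec_is_an_bn word out) := by unfold Spec_is_an_bn; infer_instance

-- ===== CLAIM (what is proved, stated in full; the proofs are below) =====
def Claim_equal_is_an_bn : Prop := ∀ (word : String), Dom_is_an_bn word → Spec_is_an_bn word (is_an_bn word)

-- ===== LEMMAS AND PROOFS =====

lemma pvLoop1_eq (cs : List Char) (acc : Int) :
    pvLoop1 cs acc =
      if (cs.dropWhile (fun c => c == 'a')).head?.all (fun c => c == 'b')
      then some (acc + ((cs.takeWhile (fun c => c == 'a')).length : Int))
      else none := by
  induction cs generalizing acc with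
  | nil => simp [pvLoop1]
  | cons c rest ih =>
    by_cases hc : c = 'a'
    · subst hc
      simp only [pvLoop1, beq_self_eq_true, if_true, ih, List.dropWhile_cons_of_pos,
        List.takeWhile_cons_of_pos]
      split
      · congr 1
        simp only [List.length_cons]
        push_cast
        ring
      · rfl
    · by_cases hb : c = 'b'
      · subst hb
        simp [pvLoop1, List.dropWhile, List.takeWhile]
      · rw [pvLoop1, if_neg (by simpa using hc), if_neg (by simpa using hb)]
        rw [List.dropWhile_cons_of_neg (by simpa using hc)]
        simp [hb]

lemma pvLoop2_eq (l : List Char) (a : Int) :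
    pvLoop2 l a = ((0 ≤ a) && (l == List.replicate a.toNat 'b')) := by
  induction l generalizing a with
  | nil =>
    simp only [pvLoop2]
    rw [Bool.eq_iff_iff]
    simp only [beq_iff_eq, Bool.and_eq_true, decide_eq_true_eq, List.nil_eq,
      List.replicate_eq_nil_iff]
    omega
  | cons c rest ih =>
    by_cases hb : c = 'b'
    · subst hb
      simp only [pvLoop2, bne_self_eq_false, Bool.false_eq_true, if_false, ih]
      rw [Bool.eq_iff_iff]
      simp only [Bool.and_eq_true, beq_iff_eq, decide_eq_true_eq]
      constructor
      · rintro ⟨h1, h2⟩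
        have hk : a.toNat = (a - 1).toNat + 1 := by omega
        exact ⟨by omega, by rw [hk, List.replicate_succ, h2]⟩
      · rintro ⟨h1, h2⟩
        cases hn : a.toNat with
        | zero => rw [hn] at h2; simp at h2
        | succ m =>
          rw [hn, List.replicate_succ] at h2
          simp only [List.cons.injEq] at h2
          refine ⟨by omega, ?_⟩
          rw [h2.2]
          congr 1
          omega
    · simp only [pvLoop2]
      rw [if_pos (by simpa using hb)]
      rw [Bool.eq_iff_iff]
      simp only [Bool.false_eq_true, false_iff, Bool.and_eq_true, beq_iff_eq,
        decide_eq_true_eq, not_and]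
      intro h0 h
      cases hn : a.toNat with
      | zero => rw [hn] at h; simp at h
      | succ m => rw [hn, List.replicate_succ] at h; simp at h; exact hb h.1

lemma dropWhile_replicate_append (n : ℕ) (l : List Char) :
    List.dropWhile (fun c => c == 'a') (List.replicate n 'a' ++ l) =
      List.dropWhile (fun c => c == 'a') l := by
  induction n with
  | zero => simp
  | succ m ih => simp [List.replicate_succ, ih]

lemma takeWhile_replicate_append (n : ℕ) (l : List Char) :
    List.takeWhile (fun c => c == 'a') (List.replicate n 'a' ++ l) =
      List.replicate n 'a' ++ List.takeWhile (fun c => c == 'a') l := by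
  induction n with
  | zero => simp
  | succ m ih => simp [List.replicate_succ, ih]

lemma dropWhile_replicate_b (n : ℕ) :
    List.dropWhile (fun c => c == 'a') (List.replicate n 'b') = List.replicate n 'b' := by
  cases n with
  | zero => simp
  | succ m => simp [List.replicate_succ]

lemma takeWhile_replicate_b (n : ℕ) :
    List.takeWhile (fun c => c == 'a') (List.replicate n 'b') = [] := by
  cases n with
  | zero => simp
  | succ m => simp [List.replicate_succ]

lemma takeWhile_eq_replicate_a (cs : List Char) :
    cs.takeWhile (fun c => c == 'a') =
      List.replicate (cs.takeWhile (fun c => c == 'a')).length 'a' := by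
  rw [List.eq_replicate_iff]
  refine ⟨rfl, ?_⟩
  intro b hb
  have := List.mem_takeWhile_imp hb
  simpa using this

lemma dropWhile_head_ne (l : List Char) :
    (List.dropWhile (fun c => c == 'a') l).head? ≠ some 'a' := by
  induction l with
  | nil => simp
  | cons c rest ih =>
    by_cases hc : c = 'a'
    · subst hc; simpa [List.dropWhile] using ih
    · rw [List.dropWhile_cons_of_neg (by simpa using hc)]
      simpa using hc

lemma dropWhile_of_head_ne (t : List Char) (h : t.head? ≠ some 'a') :
    List.dropWhile (fun c => c == 'a') t = t := by
  cases t with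
  | nil => simp
  | cons c rest =>
    rw [List.dropWhile_cons_of_neg]
    simp only [List.head?_cons, ne_eq, Option.some.injEq] at h
    simpa using h

lemma takeWhile_of_head_ne (t : List Char) (h : t.head? ≠ some 'a') :
    List.takeWhile (fun c => c == 'a') t = [] := by
  cases t with
  | nil => simp
  | cons c rest =>
    rw [List.takeWhile_cons_of_neg]
    simp only [List.head?_cons, ne_eq, Option.some.injEq] at h
    simpa using h

-- the central characterisation: for cs = aᵏ ++ t with k ≥ 1 and t not starting with 'a',
-- "t = bᵏ" is exactly B's even-length-and-canonical-form test on cs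
lemma key_iff (k : ℕ) (t : List Char) (hk : 1 ≤ k) (hth : t.head? ≠ some 'a') :
    (t = List.replicate k 'b') ↔
      ((List.replicate k 'a' ++ t).length % 2 = 0 ∧
        List.replicate k 'a' ++ t =
          List.replicate ((List.replicate k 'a' ++ t).length / 2) 'a' ++
          List.replicate ((List.replicate k 'a' ++ t).length / 2) 'b') := by
  constructor
  · intro hteq
    subst hteq
    have hlen : (List.replicate k 'a' ++ List.replicate k 'b').length = 2 * k := by
      simp; omega
    rw [hlen]
    refine ⟨by omega, ?_⟩
    have : 2 * k / 2 = k := by omega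
    rw [this]
  · rintro ⟨hev, heq⟩
    have hn1 : 1 ≤ (List.replicate k 'a' ++ t).length / 2 := by
      have hlen : 1 ≤ (List.replicate k 'a' ++ t).length := by simp; omega
      by_contra hn
      have h0 : (List.replicate k 'a' ++ t).length / 2 = 0 := by omega
      rw [h0] at heq
      simp at heq
      omega
    have hdw := congrArg (fun l => List.dropWhile (fun c => c == 'a') l) heq
    simp only at hdw
    rw [dropWhile_replicate_append, dropWhile_replicate_append, dropWhile_replicate_b,
      dropWhile_of_head_ne t hth] at hdw
    have htw := congrArg (fun l => (List.takeWhile (fun c => c == 'a') l).length) heq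
    simp only at htw
    rw [takeWhile_replicate_append, takeWhile_replicate_append, takeWhile_replicate_b,
      takeWhile_of_head_ne t hth] at htw
    simp only [List.length_append, List.length_replicate, List.length_nil,
      Nat.add_zero] at htw hdw
    rw [← htw] at hdw
    exact hdw

lemma drop_replicate_append (k : ℕ) (t : List Char) :
    (List.replicate k 'a' ++ t).drop k = t := by
  induction k with
  | zero => simp
  | succ m ih => simp [List.replicate_succ, ih]

-- the key characterisation: A's body equals B's formula, on the char list
lemma core (cs : List Char) :
    (if cs == [] then true
     else if cs.head? != some 'a' then false
     else match pvLoop1 cs 0 with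
       | none => false
       | some a => pvLoop2 (cs.drop a.toNat) a) =
    ((cs.length % 2 == 0) && (cs == List.replicate (cs.length / 2) 'a' ++ List.replicate (cs.length / 2) 'b')) := by
  cases cs with
  | nil => simp
  | cons c rest =>
    rw [if_neg (by simp)]
    by_cases hc : c = 'a'
    · subst hc
      rw [if_neg (by simp), pvLoop1_eq]
      -- abbreviations
      have hth := dropWhile_head_ne ('a' :: rest)
      have hkpos : 1 ≤ (List.takeWhile (fun c => c == 'a') ('a' :: rest)).length := by
        rw [List.takeWhile_cons_of_pos (by simp)]
        simp
      have hsplit : 'a' :: rest =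
          List.replicate (List.takeWhile (fun c => c == 'a') ('a' :: rest)).length 'a' ++
            List.dropWhile (fun c => c == 'a') ('a' :: rest) := by
        conv_lhs => rw [← List.takeWhile_append_dropWhile (p := fun c => c == 'a') (l := 'a' :: rest)]
        rw [← takeWhile_eq_replicate_a]
      have hkey := key_iff (List.takeWhile (fun c => c == 'a') ('a' :: rest)).length
        (List.dropWhile (fun c => c == 'a') ('a' :: rest)) hkpos hth
      rw [← hsplit] at hkey
      by_cases hall : (Option.all (fun c => c == 'b')
          (List.dropWhile (fun c => c == 'a') ('a' :: rest)).head?) = true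
      · rw [if_pos hall]
        show pvLoop2 (List.drop ((0 : Int) + ((List.takeWhile (fun c => c == 'a') ('a' :: rest)).length : Int)).toNat ('a' :: rest))
          ((0 : Int) + ((List.takeWhile (fun c => c == 'a') ('a' :: rest)).length : Int)) = _
        rw [pvLoop2_eq]
        have htn : ((0 : Int) + ((List.takeWhile (fun c => c == 'a') ('a' :: rest)).length : Int)).toNat
            = (List.takeWhile (fun c => c == 'a') ('a' :: rest)).length := by omega
        rw [htn]
        have hdrop : List.drop (List.takeWhile (fun c => c == 'a') ('a' :: rest)).length ('a' :: rest)
            = List.dropWhile (fun c => c == 'a') ('a' :: rest) := by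
          nth_rewrite 2 [hsplit]
          exact drop_replicate_append _ _
        rw [hdrop]
        rw [Bool.eq_iff_iff]
        simp only [Bool.and_eq_true, beq_iff_eq, decide_eq_true_eq]
        constructor
        · rintro ⟨_, h⟩
          exact hkey.mp h
        · intro h
          exact ⟨by omega, hkey.mpr h⟩
      · rw [if_neg hall]
        show false = _
        rw [Bool.eq_iff_iff]
        simp only [Bool.false_eq_true, false_iff, Bool.and_eq_true, beq_iff_eq,
          decide_eq_true_eq, not_and]
        intro hev heq
        have ht := hkey.mpr ⟨hev, heq⟩
        rw [ht] at hall
        cases k : (List.takeWhile (fun c => c == 'a') ('a' :: rest)).length with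
        | zero => omega
        | succ m => rw [k, List.replicate_succ] at hall; simp at hall
    · rw [if_pos (by simpa using hc)]
      rw [Bool.eq_iff_iff]
      simp only [Bool.false_eq_true, false_iff, Bool.and_eq_true, beq_iff_eq,
        decide_eq_true_eq, not_and]
      intro hev heq
      have hn1 : 1 ≤ (c :: rest).length / 2 := by
        by_contra hn
        have h0 : (c :: rest).length / 2 = 0 := by omega
        rw [h0] at heq
        simp at heq
      obtain ⟨m, hm⟩ : ∃ m, (c :: rest).length / 2 = m + 1 :=
        ⟨(c :: rest).length / 2 - 1, by omega⟩
      rw [hm, List.replicate_succ] at heq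
      simp only [List.cons_append, List.cons.injEq] at heq
      exact hc heq.1

-- ===== VERDICT (by name: the statement is the Claim_ definition above) =====
theorem is_an_bn_spec : Claim_equal_is_an_bn := by
  intro word _
  unfold Spec_is_an_bn is_an_bn is_an_bn_alt
  exact core word.toList
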